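-- pv_equiv track=rewrite | github.com/miliar/Code_Jam_Webscraper | solutions_python/Problem_155/3019.py | friends_to_invite
-- ===== SOURCE A (Python) =====
-- def friends_to_invite(n,shyness):
--     invite = 0
--     joined = shyness[0]
--
--     for index in range(1,n+1):
--         if index <= joined:
--             joined += shyness[index]
--         else:
--             invite += (index - joined)
--             joined += (shyness[index] + index - joined)
--     return invite
-- ===== SOURCE B (Python) =====
-- def friends_to_invite(n, shyness):
--     prefix = []
--     total = 0
--     for k in range(0, n + 1):
--         total += shyness[k]
--         prefix.append(total)
--     return max([0] + [i - prefix[i - 1] for i in range(1, n + 1)])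
-- ===== Notes on version B (the rewrite author's own statement) =====
-- stated objective: alternative
-- what changed: B is a two-stage pipeline: it first materialises the prefix-sum list of shyness, then returns max([0] + [i - prefix[i-1] for i in range(1,n+1)]), replacing A's single entangled pass whose 'joined' accumulator folds the invites back in.
import Mathlib
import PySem

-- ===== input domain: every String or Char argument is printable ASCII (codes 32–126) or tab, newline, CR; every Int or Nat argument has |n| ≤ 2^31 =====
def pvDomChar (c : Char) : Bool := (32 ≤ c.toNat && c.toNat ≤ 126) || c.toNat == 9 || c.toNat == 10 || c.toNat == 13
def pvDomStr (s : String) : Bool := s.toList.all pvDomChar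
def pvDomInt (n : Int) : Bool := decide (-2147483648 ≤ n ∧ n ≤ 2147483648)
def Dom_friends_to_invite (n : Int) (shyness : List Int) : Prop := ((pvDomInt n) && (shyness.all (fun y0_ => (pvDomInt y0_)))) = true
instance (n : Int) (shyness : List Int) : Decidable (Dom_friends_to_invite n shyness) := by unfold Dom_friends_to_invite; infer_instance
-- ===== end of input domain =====

-- B replaces A's single-pass entangled accumulator by two staged passes — build the
-- prefix-sum list of shyness, then take the max of the shortfalls i - prefix[i-1]
-- (with 0) — objective: simpler/alternative decomposition, same O(n) cost.


-- ===== PORT A =====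
-- state = (invite, joined); inside Pre_ every pyGetD hits an existing index, so the
-- default 0 is never consulted (Python raises IndexError exactly outside Pre_)
def pvStepA (shyness : List Int) (s : Int × Int) (index : Int) : Int × Int :=
  if index ≤ s.2 then (s.1, s.2 + PySem.List.pyGetD shyness index 0)
  else (s.1 + (index - s.2), s.2 + (PySem.List.pyGetD shyness index 0 + index - s.2))

def friends_to_invite (n : Int) (shyness : List Int) : Int :=
  ((PySem.List.pyRange 1 (n + 1) 1).foldl (pvStepA shyness)
    (0, PySem.List.pyGetD shyness 0 0)).1

-- ===== PORT B =====
-- first pass: append the running totals to the prefix list (state = (prefix, total))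
def pvPrefixStep (shyness : List Int) (s : List Int × Int) (k : Int) : List Int × Int :=
  (s.1 ++ [s.2 + PySem.List.pyGetD shyness k 0], s.2 + PySem.List.pyGetD shyness k 0)

-- the prefix list the first pass builds
def pvPrefix (n : Int) (shyness : List Int) : List Int :=
  ((PySem.List.pyRange 0 (n + 1) 1).foldl (pvPrefixStep shyness) ([], 0)).1

-- second pass: max([0] + [i - prefix[i-1] for i in range(1, n+1)])
def friends_to_invite_alt (n : Int) (shyness : List Int) : Int :=
  (PySem.List.max?
      (0 :: (PySem.List.pyRange 1 (n + 1) 1).map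
        (fun i => i - PySem.List.pyGetD (pvPrefix n shyness) (i - 1) 0))
      (fun y => y)).getD 0

-- ===== PRECONDITION & SPEC =====
-- Pre_ excludes exactly the inputs where Python's shyness[0] / shyness[index] raises IndexError
def Pre_friends_to_invite (n : Int) (shyness : List Int) : Prop :=
  shyness ≠ [] ∧ n < (shyness.length : Int)
instance (n : Int) (shyness : List Int) : Decidable (Pre_friends_to_invite n shyness) := by
  unfold Pre_friends_to_invite; infer_instance

def pvWitness_friends_to_invite : Int × List Int := (3, [1, 0, 0, 2])

def Spec_friends_to_invite (n : Int) (shyness : List Int) (out : Int) : Prop := out = friends_to_invite_alt n shyness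
instance (n : Int) (shyness : List Int) (out : Int) : Decidable (Spec_friends_to_invite n shyness out) := by unfold Spec_friends_to_invite; infer_instance

-- ===== CLAIM (what is proved, stated in full; the proofs are below) =====
def Claim_equal_friends_to_invite : Prop := ∀ (n : Int) (shyness : List Int), Dom_friends_to_invite n shyness → Pre_friends_to_invite n shyness → Spec_friends_to_invite n shyness (friends_to_invite n shyness)

-- ===== LEMMAS AND PROOFS =====
-- cumulative shyness: pvT shyness j = shyness[0] + … + shyness[j-1] (getD view)
def pvT (shyness : List Int) (j : Int) : Int :=
  ((PySem.List.pyRange 0 j 1).map (fun k => PySem.List.pyGetD shyness k 0)).sum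

theorem pvT_succ (shyness : List Int) (j : Int) (hj : 0 ≤ j) :
    pvT shyness (j + 1) = pvT shyness j + PySem.List.pyGetD shyness j 0 := by
  unfold pvT
  rw [PySem.List.pyRange_one_succ_right hj, List.map_append, List.sum_append]
  simp

-- the first pass produces exactly the cumulative sums pvT 1, …, pvT (n+1)
theorem pv_prefix_run (shyness : List Int) (m : Nat) :
    (PySem.List.pyRange 0 (m : Int) 1).foldl (pvPrefixStep shyness) ([], 0)
      = ((List.range m).map (fun k : Nat => pvT shyness ((k : Int) + 1)), pvT shyness (m : Int)) := by
  induction m with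
  | zero =>
    simp [PySem.List.pyRange_one_eq_nil, pvT, PySem.List.pyRange_zero]
  | succ m ih =>
    have h0 : (0 : Int) ≤ (m : Int) := Int.natCast_nonneg m
    have hcast : ((m + 1 : Nat) : Int) = (m : Int) + 1 := by push_cast; ring
    rw [hcast, PySem.List.pyRange_one_succ_right h0, List.foldl_append, ih]
    simp only [List.foldl_cons, List.foldl_nil, pvPrefixStep, List.range_succ, List.map_append]
    simp [pvT_succ shyness _ h0]

-- looking up prefix[i-1] gives pvT i for 1 ≤ i ≤ m
theorem pv_prefix_get (shyness : List Int) (m : Nat) (i : Int)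
    (h1 : 1 ≤ i) (h2 : i ≤ (m : Int)) :
    PySem.List.pyGetD ((List.range m).map (fun k : Nat => pvT shyness ((k : Int) + 1))) (i - 1) 0
      = pvT shyness i := by
  obtain ⟨k, hk1, hk2⟩ : ∃ k : Nat, (k : Int) = i - 1 ∧ k < m :=
    ⟨(i - 1).toNat, by omega, by omega⟩
  rw [← hk1, PySem.List.pyGetD_natCast]
  rw [List.getD_eq_getElem?_getD, List.getElem?_map, List.getElem?_range hk2]
  simp only [Option.map_some, Option.getD_some]
  congr 1
  omega

-- A's loop computes the running max of the shortfalls i - pvT i over the same range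
theorem pv_loopA (shyness : List Int) (m : Nat) :
    ∀ (a inv : Int), 1 ≤ a →
    ((PySem.List.pyRange a (a + (m : Nat)) 1).foldl (pvStepA shyness) (inv, pvT shyness a + inv)).1
      = ((PySem.List.pyRange a (a + (m : Nat)) 1).map (fun i => i - pvT shyness i)).foldl max inv := by
  induction m with
  | zero => intro a inv _; simp [PySem.List.pyRange_one_eq_nil]
  | succ m ih =>
    intro a inv ha
    have hcast : ((m + 1 : Nat) : Int) = (m : Int) + 1 := by push_cast; ring
    have hcons : PySem.List.pyRange a (a + ((m : Int) + 1)) 1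
        = a :: PySem.List.pyRange (a + 1) (a + ((m : Int) + 1)) 1 :=
      PySem.List.pyRange_one_cons (by omega)
    have harr : a + ((m : Int) + 1) = (a + 1) + (m : Int) := by ring
    have hTs : pvT shyness (a + 1) = pvT shyness a + PySem.List.pyGetD shyness a 0 :=
      pvT_succ shyness a (by omega)
    rw [hcast, hcons, List.foldl_cons, List.map_cons, List.foldl_cons, pvStepA]
    by_cases h : a ≤ pvT shyness a + inv
    · have hmax : max inv (a - pvT shyness a) = inv := by omega
      rw [if_pos h, hmax]
      have hstate : pvT shyness a + inv + PySem.List.pyGetD shyness a 0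
          = pvT shyness (a + 1) + inv := by rw [hTs]; ring
      rw [harr, hstate]
      exact ih (a + 1) inv (by omega)
    · have hmax : max inv (a - pvT shyness a) = a - pvT shyness a := by omega
      rw [if_neg h, hmax]
      have hstate : pvT shyness a + inv
            + (PySem.List.pyGetD shyness a 0 + a - (pvT shyness a + inv))
          = pvT shyness (a + 1) + (a - pvT shyness a) := by rw [hTs]; ring
      have he2 : inv + (a - (pvT shyness a + inv)) = a - pvT shyness a := by ring
      rw [harr, hstate, he2]
      exact ih (a + 1) (a - pvT shyness a) (by omega)

-- ===== VERDICT (by name: the statement is the Claim_ definition above) =====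
theorem friends_to_invite_spec : Claim_equal_friends_to_invite := by
  intro n shyness _ hpre
  unfold Spec_friends_to_invite friends_to_invite friends_to_invite_alt
  by_cases hn : n ≤ 0
  · rw [PySem.List.pyRange_one_eq_nil (show n + 1 ≤ 1 by omega)]
    rw [PySem.List.max?_id_cons]
    simp
  · obtain ⟨m, hmn, hm1⟩ : ∃ m : Nat, (m : Int) = n ∧ 1 ≤ m := ⟨n.toNat, by omega, by omega⟩
    have hmm : n + 1 = ((m + 1 : Nat) : Int) := by push_cast; omega
    unfold pvPrefix
    rw [hmm, pv_prefix_run shyness (m + 1)]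
    have hmap : (PySem.List.pyRange 1 ((m + 1 : Nat) : Int) 1).map
        (fun i => i - PySem.List.pyGetD
          ((List.range (m + 1)).map (fun k : Nat => pvT shyness ((k : Int) + 1))) (i - 1) 0)
        = (PySem.List.pyRange 1 ((m + 1 : Nat) : Int) 1).map (fun i => i - pvT shyness i) := by
      apply List.map_congr_left
      intro i hi
      rw [PySem.List.mem_pyRange_one] at hi
      rw [pv_prefix_get shyness (m + 1) i hi.1 (by push_cast; omega)]
    rw [hmap, PySem.List.max?_id_cons]
    simp only [Option.getD_some]
    have h1 : ((m + 1 : Nat) : Int) = 1 + (m : Int) := by push_cast; ring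
    have hT1 : pvT shyness 1 = PySem.List.pyGetD shyness 0 0 := by
      simpa [pvT] using pvT_succ shyness 0 le_rfl
    have hA := pv_loopA shyness m 1 0 le_rfl
    rw [hT1] at hA
    rw [h1]
    simpa using hA
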